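-- pv_equiv track=rewrite | github.com/alexlitz/cllm_temp | c4_release/neural_vm/semantic_metadata.py | extract_semantic_metadata
-- ===== SOURCE A (Python) =====
-- from typing import List, Dict
--
-- def extract_semantic_metadata(context_tokens: List[int]) -> List[Dict]:
--     """
--     Extract semantic metadata from VM execution context tokens.
--
--     For each token position, determines:
--     - Type: memory_write, memory_read, io, register, other
--     - Address: For memory operations
--     - Register: For register operations
--     - Value: For zero-write detection
--
--     Args:
--         context_tokens: List of token IDs from VM execution
--
--     Returns:
--         List of metadata dicts, one per token:
--         {
--             'type': str,  # 'memory_write', 'memory_read', 'io', 'register', 'other'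
--             'address': int (optional),
--             'register': str (optional),
--             'value': int (optional),
--         }
--     """
--     # For now, return simple metadata
--     # This is a placeholder - full implementation would decode the embedding
--     # to extract actual semantic information
--
--     # Each VM step generates 35 tokens in our current setup
--     # We group tokens and analyze semantics
--
--     metadata = []
--
--     for i, token in enumerate(context_tokens):
--         meta = {'type': 'other'}
--
--         # Simple heuristic: Analyze token position in sequence
--         # Real implementation would decode embedding values
--
--         # Position in current VM step (35 tokens per step)
--         step_pos = i % 35
--
--         # Heuristic classification based on position
--         # (This is simplified - real version would decode embedding)
--
--         if step_pos >= 0 and step_pos < 8: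
--             # Arithmetic unit tokens
--             meta['type'] = 'other'
--         elif step_pos >= 8 and step_pos < 16:
--             # Memory/register tokens
--             meta['type'] = 'register'
--             meta['register'] = f'pos_{step_pos}'
--         elif step_pos >= 16 and step_pos < 24:
--             # Could be memory operations
--             meta['type'] = 'memory_read'
--         elif step_pos >= 24 and step_pos < 32:
--             # Could be I/O
--             meta['type'] = 'io'
--
--         metadata.append(meta)
--
--     return metadata
-- ===== SOURCE B (Python) =====
-- def extract_semantic_metadata(context_tokens):
--     # Precompute one template dict per step position (35 tokens per VM step),
--     # then emit a fresh copy of the right template for each token index.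
--     table = []
--     for p in range(35):
--         if 8 <= p < 16:
--             table.append({'type': 'register', 'register': f'pos_{p}'})
--         elif 16 <= p < 24:
--             table.append({'type': 'memory_read'})
--         elif 24 <= p < 32:
--             table.append({'type': 'io'})
--         else:
--             table.append({'type': 'other'})
--     return [dict(table[i % 35]) for i in range(len(context_tokens))]
-- ===== Notes on version B (the rewrite author's own statement) =====
-- stated objective: simpler
-- what changed: Replaced the per-token four-way branch (with a dict mutated in place) by a precomputed 35-entry template table indexed by i % 35, with the result built as a comprehension over token indices.
import Mathlib
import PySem

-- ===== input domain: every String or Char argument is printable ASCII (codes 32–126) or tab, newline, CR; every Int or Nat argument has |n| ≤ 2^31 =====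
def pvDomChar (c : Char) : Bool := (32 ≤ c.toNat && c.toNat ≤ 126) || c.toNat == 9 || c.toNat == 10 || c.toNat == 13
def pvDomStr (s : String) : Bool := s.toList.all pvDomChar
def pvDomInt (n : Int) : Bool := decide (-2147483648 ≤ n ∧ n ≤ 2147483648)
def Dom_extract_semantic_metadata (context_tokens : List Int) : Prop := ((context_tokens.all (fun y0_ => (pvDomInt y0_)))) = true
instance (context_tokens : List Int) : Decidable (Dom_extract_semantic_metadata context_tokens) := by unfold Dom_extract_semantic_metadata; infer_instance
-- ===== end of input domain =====

-- B replaces A's per-token four-way branch by a precomputed 35-entry template table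
-- indexed by i % 35; objective: simpler.

-- ===== PORT A =====
-- the dict built for one token at enumerate-index i (A's loop body)
def pvMetaA (i : Int) : List (String × String) :=
  let metaD : PySem.Dict String String := PySem.Dict.empty.insert "type" "other"
  let step_pos := PySem.Int.mod i 35
  (if 0 ≤ step_pos ∧ step_pos < 8 then
    PySem.Dict.insert metaD "type" "other"
  else if 8 ≤ step_pos ∧ step_pos < 16 then
    PySem.Dict.insert (PySem.Dict.insert metaD "type" "register") "register"
      ("pos_" ++ PySem.Int.toStr step_pos)
  else if 16 ≤ step_pos ∧ step_pos < 24 then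
    PySem.Dict.insert metaD "type" "memory_read"
  else if 24 ≤ step_pos ∧ step_pos < 32 then
    PySem.Dict.insert metaD "type" "io"
  else metaD).items

def extract_semantic_metadata (context_tokens : List Int) : List (List (String × String)) :=
  (PySem.List.enumerate context_tokens).foldl
    (fun metadata it => metadata ++ [pvMetaA it.1]) []

-- ===== PORT B =====
-- table[p] for p in range(35)
def pvTable : List (List (String × String)) :=
  (PySem.List.pyRange 0 35 1).foldl
    (fun table p =>
      table ++
        [if 8 ≤ p ∧ p < 16 then
            [("type", "register"), ("register", "pos_" ++ PySem.Int.toStr p)]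
         else if 16 ≤ p ∧ p < 24 then [("type", "memory_read")]
         else if 24 ≤ p ∧ p < 32 then [("type", "io")]
         else [("type", "other")]])
    []

def extract_semantic_metadata_alt (context_tokens : List Int) : List (List (String × String)) :=
  (PySem.List.pyRange 0 (PySem.List.len context_tokens) 1).map
    (fun i => PySem.List.pyGetD pvTable (PySem.Int.mod i 35) [])

-- ===== PRECONDITION & SPEC =====
def Spec_extract_semantic_metadata (context_tokens : List Int) (out : List (List (String × String))) : Prop := out = extract_semantic_metadata_alt context_tokens
instance (context_tokens : List Int) (out : List (List (String × String))) : Decidable (Spec_extract_semantic_metadata context_tokens out) := by unfold Spec_extract_semantic_metadata; infer_instance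

-- ===== CLAIM (what is proved, stated in full; the proofs are below) =====
def Claim_equal_extract_semantic_metadata : Prop := ∀ (context_tokens : List Int), Dom_extract_semantic_metadata context_tokens → Spec_extract_semantic_metadata context_tokens (extract_semantic_metadata context_tokens)

-- ===== LEMMAS AND PROOFS =====

-- both sides depend only on i % 35 ∈ [0,35): one check per residue
theorem pvMetaA_eq_table (i : Int) :
    pvMetaA i = PySem.List.pyGetD pvTable (PySem.Int.mod i 35) [] := by
  have h0 : 0 ≤ PySem.Int.mod i 35 := PySem.Int.mod_nonneg i (by norm_num)
  have h35 : PySem.Int.mod i 35 < 35 := PySem.Int.mod_lt i (by norm_num)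
  have hmem : PySem.Int.mod i 35 ∈ PySem.List.pyRange 0 35 1 :=
    (PySem.List.mem_pyRange_one).mpr ⟨h0, h35⟩
  have key : ∀ m ∈ PySem.List.pyRange 0 35 1,
      pvMetaA m = PySem.List.pyGetD pvTable m [] := by decide
  have hself : PySem.Int.mod (PySem.Int.mod i 35) 35 = PySem.Int.mod i 35 := by
    have e := PySem.Int.floordiv_mul_add_mod (PySem.Int.mod i 35) 35
    have b0 : 0 ≤ PySem.Int.mod (PySem.Int.mod i 35) 35 :=
      PySem.Int.mod_nonneg _ (by norm_num)
    have b1 : PySem.Int.mod (PySem.Int.mod i 35) 35 < 35 :=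
      PySem.Int.mod_lt _ (by norm_num)
    omega
  have := key _ hmem
  unfold pvMetaA at this ⊢
  rw [hself] at this
  exact this

theorem extract_semantic_metadata_spec : Claim_equal_extract_semantic_metadata := by
  intro xs _
  show extract_semantic_metadata xs = extract_semantic_metadata_alt xs
  unfold extract_semantic_metadata extract_semantic_metadata_alt
  rw [PySem.List.foldl_append_singleton_eq_map, List.nil_append]
  have : (PySem.List.enumerate xs).map (fun it => pvMetaA it.1)
      = ((PySem.List.enumerate xs).map (·.1)).map pvMetaA := by
    simp [List.map_map, Function.comp]
  rw [this, PySem.List.map_fst_enumerate]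
  simp only [PySem.List.len_eq, zero_add]
  exact List.map_congr_left fun i _ => pvMetaA_eq_table i
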